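-- pv_equiv track=rewrite | github.com/qingchuanli/harbor_patch_memory | harbor_patch_memory/memory/summarizer.py | _excerpt_diff
-- ===== SOURCE A (Python) =====
-- def _excerpt_diff(diff_text: str, files: list[str]) -> str:
--     if not diff_text:
--         return ""
--     if not files:
--         return diff_text[:5000]
--     lines = diff_text.splitlines()
--     collected: list[str] = []
--     keep = False
--     for line in lines:
--         if line.startswith("diff --git "):
--             keep = any(path in line for path in files)
--         if keep:
--             collected.append(line)
--     return "\n".join(collected)[:5000]
-- ===== SOURCE B (Python) =====
-- def _excerpt_diff(diff_text: str, files: list[str]) -> str: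
--     if not diff_text:
--         return ""
--     if not files:
--         return diff_text[:5000]
--     # partition lines into header-led blocks, dropping the pre-header preamble
--     blocks: list[list[str]] = []
--     current: list[str] | None = None
--     for line in diff_text.splitlines():
--         if line.startswith("diff --git "):
--             if current is not None:
--                 blocks.append(current)
--             current = [line]
--         elif current is not None:
--             current.append(line)
--     if current is not None:
--         blocks.append(current)
--     selected = [ln for b in blocks if any(p in b[0] for p in files) for ln in b]
--     return "\n".join(selected)[:5000]
-- ===== Notes on version B (the rewrite author's own statement) =====
-- stated objective: alternative
-- what changed: Replaces the stateful keep-toggle single pass with a partition-then-filter decomposition: lines are first grouped into header-led blocks (preamble dropped), then blocks whose header mentions a target path are selected and flattened.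
import Mathlib
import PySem

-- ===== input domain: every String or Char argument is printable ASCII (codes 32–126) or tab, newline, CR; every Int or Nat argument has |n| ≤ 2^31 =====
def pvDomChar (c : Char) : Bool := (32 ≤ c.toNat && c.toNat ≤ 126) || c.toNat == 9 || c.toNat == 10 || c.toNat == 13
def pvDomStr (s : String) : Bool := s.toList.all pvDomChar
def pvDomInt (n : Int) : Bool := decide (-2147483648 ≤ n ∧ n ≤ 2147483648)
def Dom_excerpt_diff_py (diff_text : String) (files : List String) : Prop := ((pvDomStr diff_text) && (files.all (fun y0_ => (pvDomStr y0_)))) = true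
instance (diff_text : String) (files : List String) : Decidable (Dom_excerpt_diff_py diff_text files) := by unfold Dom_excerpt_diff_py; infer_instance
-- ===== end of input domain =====

-- B changes the decomposition: blocks first, then filter (alternative structure, same cost).

-- ===== PORT A =====
-- one loop step of A: state (collected, keep)
def pvStepA (files : List String) (st : List String × Bool) (line : String) : List String × Bool :=
  let keep := if PySem.Str.startswith line "diff --git " then
      files.any (fun path => PySem.Str.isIn path line) else st.2
  (if keep then st.1 ++ [line] else st.1, keep)

def excerpt_diff_py (diff_text : String) (files : List String) : String :=
  if diff_text == "" then ""
  else if files == [] then PySem.Str.slice diff_text none (some 5000)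
  else
    let lines := PySem.Str.splitlines diff_text
    let st := lines.foldl (pvStepA files) ([], false)
    PySem.Str.slice (PySem.Str.join "\n" st.1) none (some 5000)

-- ===== PORT B =====
-- one loop step of B: state (blocks, current)
def pvStepB (st : List (List String) × Option (List String)) (line : String) :
    List (List String) × Option (List String) :=
  if PySem.Str.startswith line "diff --git " then
    (match st.2 with | none => st.1 | some c => st.1 ++ [c], some [line])
  else
    match st.2 with
    | none => (st.1, none)
    | some c => (st.1, some (c ++ [line]))

def pvFlush (st : List (List String) × Option (List String)) : List (List String) :=
  match st.2 with | none => st.1 | some c => st.1 ++ [c]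

def pvCond (files : List String) (b : List String) : Bool :=
  files.any (fun path => PySem.Str.isIn path b.headI)

def excerpt_diff_py_alt (diff_text : String) (files : List String) : String :=
  if diff_text == "" then ""
  else if files == [] then PySem.Str.slice diff_text none (some 5000)
  else
    let blocks := pvFlush ((PySem.Str.splitlines diff_text).foldl pvStepB ([], none))
    let selected := (blocks.filter (pvCond files)).flatMap id
    PySem.Str.slice (PySem.Str.join "\n" selected) none (some 5000)

-- ===== PRECONDITION & SPEC =====
def Spec_excerpt_diff_py (diff_text : String) (files : List String) (out : String) : Prop := out = excerpt_diff_py_alt diff_text files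
instance (diff_text : String) (files : List String) (out : String) : Decidable (Spec_excerpt_diff_py diff_text files out) := by unfold Spec_excerpt_diff_py; infer_instance

-- ===== CLAIM (what is proved, stated in full; the proofs are below) =====
def Claim_equal_excerpt_diff_py : Prop := ∀ (diff_text : String) (files : List String), Dom_excerpt_diff_py diff_text files → Spec_excerpt_diff_py diff_text files (excerpt_diff_py diff_text files)

-- ===== LEMMAS AND PROOFS =====

def pvSel (files : List String) (bs : List (List String)) : List String :=
  (bs.filter (pvCond files)).flatMap id

theorem pvSel_append_one (files : List String) (bs : List (List String)) (c : List String) :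
    pvSel files (bs ++ [c]) = pvSel files bs ++ (if pvCond files c then c else []) := by
  simp only [pvSel, List.filter_append, List.flatMap_append]
  by_cases h : pvCond files c = true <;> simp [List.filter, h]

-- loop invariant: A's collected list equals the selection of B's flushed state
theorem pvLoop (files : List String) :
    ∀ (lines : List String) (col : List String) (keep : Bool)
      (bs : List (List String)) (cur : Option (List String)),
      (match cur with
       | none => keep = false ∧ col = pvSel files bs
       | some c => c ≠ [] ∧ keep = pvCond files c ∧
           col = pvSel files bs ++ (if keep then c else [])) →
      (lines.foldl (pvStepA files) (col, keep)).1 =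
        pvSel files (pvFlush (lines.foldl pvStepB (bs, cur))) := by
  intro lines
  induction lines with
  | nil =>
    intro col keep bs cur h
    cases cur with
    | none => simpa [pvFlush] using h.2
    | some c =>
      obtain ⟨-, hk, hc⟩ := h
      simp only [List.foldl_nil, pvFlush]
      rw [hc, hk, pvSel_append_one]
  | cons line rest ih =>
    intro col keep bs cur h
    simp only [List.foldl_cons]
    by_cases hh : PySem.Str.startswith line "diff --git " = true
    · -- header line: A resets keep; B closes the current block and opens a new one
      have hA : pvStepA files (col, keep) line =
          (if files.any (fun path => PySem.Str.isIn path line) then col ++ [line] else col,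
           files.any (fun path => PySem.Str.isIn path line)) := by
        unfold pvStepA; rw [if_pos hh]
      cases cur with
      | none =>
        obtain ⟨-, hc⟩ := h
        have hB : pvStepB (bs, none) line = (bs, some [line]) := by
          unfold pvStepB; rw [if_pos hh]
        rw [hA, hB]
        apply ih
        refine ⟨by simp, rfl, ?_⟩
        by_cases hK : (files.any (fun path => PySem.Str.isIn path line)) = true <;>
          simp only [hK, if_true, if_false, Bool.false_eq_true, hc, List.append_nil]
      | some c =>
        obtain ⟨-, hk, hc⟩ := h
        have hB : pvStepB (bs, some c) line = (bs ++ [c], some [line]) := by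
          unfold pvStepB; rw [if_pos hh]
        rw [hA, hB]
        apply ih
        refine ⟨by simp, rfl, ?_⟩
        rw [pvSel_append_one, hc, hk]
        by_cases hK : (files.any (fun path => PySem.Str.isIn path line)) = true <;>
          simp only [hK, if_true, if_false, Bool.false_eq_true, List.append_nil,
            List.append_assoc]
    · -- ordinary line: A keeps its toggle; B extends (or still lacks) the current block
      have hA : pvStepA files (col, keep) line =
          (if keep then col ++ [line] else col, keep) := by
        unfold pvStepA; rw [if_neg hh]
      cases cur with
      | none =>
        obtain ⟨hk, hc⟩ := h
        have hB : pvStepB (bs, none) line = (bs, none) := by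
          unfold pvStepB; rw [if_neg hh]
        rw [hA, hB]
        apply ih
        exact ⟨hk, by simp [hk, hc]⟩
      | some c =>
        obtain ⟨hne, hk, hc⟩ := h
        have hB : pvStepB (bs, some c) line = (bs, some (c ++ [line])) := by
          unfold pvStepB; rw [if_neg hh]
        rw [hA, hB]
        apply ih
        have hhead : (c ++ [line]).headI = c.headI := by
          cases c with
          | nil => exact absurd rfl hne
          | cons a t => simp [List.headI]
        refine ⟨by simp, by rw [hk]; simp only [pvCond, hhead], ?_⟩
        rw [hc]
        cases hkb : keep <;>
          simp only [if_true, if_false, Bool.false_eq_true, List.append_nil, List.append_assoc]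

-- ===== VERDICT (by name: the statement is the Claim_ definition above) =====
theorem excerpt_diff_py_spec : Claim_equal_excerpt_diff_py := by
  intro diff_text files _
  unfold Spec_excerpt_diff_py excerpt_diff_py excerpt_diff_py_alt
  by_cases h1 : diff_text == ""
  · simp [h1]
  · by_cases h2 : files == []
    · simp [h1, h2]
    · simp only [h1, h2, if_neg, Bool.false_eq_true, not_false_eq_true]
      have := pvLoop files (PySem.Str.splitlines diff_text) [] false [] none
        (by simp [pvSel])
      rw [this]
      rfl
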